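-- pv_equiv track=rewrite | github.com/DaniilAY/Daily-Programmer-solutions | partitions(Challenge 386).py | generatePMList
-- ===== SOURCE A (Python) =====
-- def generatePMList(N):
--     OP = [0]*N
--     OP[0] = 1
--     nextOptions = [1,3]
--     value = 1
--     step = 0
--     optionIndex = 0
--     nextPosition = 0 + nextOptions[optionIndex]
--
--     while nextPosition < N:
--         OP[nextPosition] = value
--
--         if optionIndex == 0:
--             nextOptions[0] += 1
--         elif optionIndex == 1:
--             nextOptions[1] += 2
--
--         step += 1
--
--         if (step+1)%4 == 0 or (step+1)%4 == 2:
--             value *= -1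
--
--         optionIndex = int((step%2))
--         nextPosition += nextOptions[optionIndex]
--
--     OP.reverse()
--     return OP
-- ===== SOURCE B (Python) =====
-- def generatePMList(N):
--     OP = [0] * N
--     OP[0] = 1
--     k = 1
--     while True:
--         g1 = k * (3 * k - 1) // 2
--         g2 = k * (3 * k + 1) // 2
--         sign = 1 if k % 2 == 1 else -1
--         if g1 - 1 < N:
--             OP[g1 - 1] = sign
--         if g2 - 1 < N:
--             OP[g2 - 1] = sign
--         if g1 - 1 >= N:
--             break
--         k += 1
--     OP.reverse()
--     return OP
-- ===== Notes on version B (the rewrite author's own statement) =====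
-- stated objective: simpler
-- what changed: Replaces A's incremental step/parity/nextOptions state machine by directly writing the closed-form generalized pentagonal positions k(3k-1)//2-1 and k(3k+1)//2-1 with sign by parity of k.
import Mathlib
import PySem

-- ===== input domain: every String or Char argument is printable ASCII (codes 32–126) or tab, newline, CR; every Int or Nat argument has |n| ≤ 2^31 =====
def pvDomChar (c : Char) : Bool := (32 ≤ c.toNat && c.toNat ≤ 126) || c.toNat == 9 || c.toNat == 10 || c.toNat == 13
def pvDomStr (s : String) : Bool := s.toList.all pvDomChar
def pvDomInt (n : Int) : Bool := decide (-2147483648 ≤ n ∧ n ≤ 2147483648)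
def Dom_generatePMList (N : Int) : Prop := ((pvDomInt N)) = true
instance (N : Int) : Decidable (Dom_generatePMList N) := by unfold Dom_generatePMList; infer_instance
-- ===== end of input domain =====

-- B replaces A's incremental step/parity state machine by the closed-form generalized
-- pentagonal numbers g1 = k(3k-1)//2, g2 = k(3k+1)//2 with sign by parity of k (objective: simpler).

-- ===== PORT A =====
-- A's while loop; fuel 2*N.toNat+2 bounds the iteration count (nextPosition starts at 1 and
-- strictly increases each iteration), so the fuel-0 branch is never reached on inputs in Pre_.
-- nextOptions = [no0, no1]; optionIndex is always 0 or 1, so nextOptions[optionIndex] is the if below.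
def pvLoopA (N : Int) : Nat → List Int → Int → Int → Int → Int → Int → Int → List Int
  | 0, OP, _, _, _, _, _, _ => OP
  | f + 1, OP, value, step, no0, no1, optIdx, nextPos =>
    if nextPos < N then
      let OP := OP.set nextPos.toNat value
      let no0 := if optIdx == 0 then no0 + 1 else no0
      let no1 := if optIdx == 1 then no1 + 2 else no1
      let step := step + 1
      let value := if PySem.Int.mod (step + 1) 4 == 0 || PySem.Int.mod (step + 1) 4 == 2
                   then value * (-1) else value
      let optIdx := PySem.Int.mod step 2
      let nextPos := nextPos + (if optIdx == 0 then no0 else no1)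
      pvLoopA N f OP value step no0 no1 optIdx nextPos
    else OP

def generatePMList (N : Int) : List Int :=
  let OP := List.replicate N.toNat 0
  let OP := OP.set 0 1          -- Python raises IndexError when N ≤ 0; excluded by Pre_
  (pvLoopA N (2 * N.toNat + 2) OP 1 0 1 3 0 (0 + 1)).reverse

-- ===== PORT B =====
-- B's while True loop; fuel N.toNat+1 bounds the iteration count (g1(k)-1 ≥ k-1).
def pvLoopB (N : Int) : Nat → List Int → Int → List Int
  | 0, OP, _ => OP
  | f + 1, OP, k =>
    let g1 := PySem.Int.floordiv (k * (3 * k - 1)) 2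
    let g2 := PySem.Int.floordiv (k * (3 * k + 1)) 2
    let sign : Int := if PySem.Int.mod k 2 == 1 then 1 else -1
    let OP := if g1 - 1 < N then OP.set (g1 - 1).toNat sign else OP
    let OP := if g2 - 1 < N then OP.set (g2 - 1).toNat sign else OP
    if g1 - 1 ≥ N then OP else pvLoopB N f OP (k + 1)

def generatePMList_alt (N : Int) : List Int :=
  let OP := List.replicate N.toNat 0
  let OP := OP.set 0 1          -- Python raises IndexError when N ≤ 0; excluded by Pre_
  (pvLoopB N (N.toNat + 1) OP 1).reverse

-- ===== PRECONDITION & SPEC =====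
-- A (and B alike) raise IndexError on N ≤ 0 (OP[0] = 1 on an empty list); nothing else is excluded.
def Pre_generatePMList (N : Int) : Prop := 1 ≤ N
instance (N : Int) : Decidable (Pre_generatePMList N) := by unfold Pre_generatePMList; infer_instance
def pvWitness_generatePMList : Int := (7)

def Spec_generatePMList (N : Int) (out : List Int) : Prop := out = generatePMList_alt N
instance (N : Int) (out : List Int) : Decidable (Spec_generatePMList N out) := by unfold Spec_generatePMList; infer_instance

-- ===== CLAIM (what is proved, stated in full; the proofs are below) =====
def Claim_equal_generatePMList : Prop := ∀ (N : Int), Dom_generatePMList N → Pre_generatePMList N → Spec_generatePMList N (generatePMList N)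

-- ===== LEMMAS AND PROOFS =====

-- Proof-side abbreviations: the two generalized pentagonal write positions and the sign.
def pvP1 (k : Int) : Int := PySem.Int.floordiv (k * (3 * k - 1)) 2 - 1
def pvP2 (k : Int) : Int := PySem.Int.floordiv (k * (3 * k + 1)) 2 - 1
def pvSgn (k : Int) : Int := if PySem.Int.mod k 2 == 1 then 1 else -1

-- The tail of one loopB iteration after the g1-write (the point matching A's even-step state).
def pvTail (N : Int) (f : Nat) (OP : List Int) (k : Int) : List Int :=
  let OP := if pvP2 k < N then OP.set (pvP2 k).toNat (pvSgn k) else OP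
  if pvP1 k ≥ N then OP else pvLoopB N f OP (k + 1)

lemma pvFd2 (a c : Int) : PySem.Int.floordiv (a + 2 * c) 2 = PySem.Int.floordiv a 2 + c := by
  rw [PySem.Int.floordiv_eq_ediv_of_pos (by norm_num), PySem.Int.floordiv_eq_ediv_of_pos (by norm_num)]
  omega

lemma pvP2_eq (k : Int) : pvP2 k = pvP1 k + k := by
  have h : k * (3 * k + 1) = k * (3 * k - 1) + 2 * k := by ring
  rw [pvP1, pvP2, h, pvFd2]; ring

lemma pvP1_succ (k : Int) : pvP1 (k + 1) = pvP2 k + (2 * k + 1) := by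
  have h : (k + 1) * (3 * (k + 1) - 1) = k * (3 * k + 1) + 2 * (2 * k + 1) := by ring
  rw [pvP1, pvP2, h, pvFd2]; ring

lemma pvSgn_succ (k : Int) : pvSgn k * (-1) = pvSgn (k + 1) := by
  have h2 : (0:Int) < 2 := by norm_num
  simp only [pvSgn, PySem.Int.mod_eq_emod_of_pos h2]
  rcases Int.emod_two_eq k with h | h <;>
    · have h' : (k + 1) % 2 = (k % 2 + 1) % 2 := by omega
      simp [h, h']

lemma pvMod4_even (k : Int) :
    (PySem.Int.mod (2 * k) 4 == 0 || PySem.Int.mod (2 * k) 4 == 2) = true := by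
  rw [PySem.Int.mod_eq_emod_of_pos (by norm_num : (0:Int) < 4)]
  have h : (2 * k) % 4 = 0 ∨ (2 * k) % 4 = 2 := by omega
  rcases h with h | h <;> simp [h]

lemma pvMod2_odd (k : Int) : PySem.Int.mod (2 * k - 1) 2 = 1 := by
  rw [PySem.Int.mod_eq_emod_of_pos (by norm_num : (0:Int) < 2)]; omega

lemma pvMod2_even (k : Int) : PySem.Int.mod (2 * k) 2 = 0 := by
  rw [PySem.Int.mod_eq_emod_of_pos (by norm_num : (0:Int) < 2)]; omega

lemma pvTail_vacuous (N : Int) (f : Nat) (k : Int) (OP : List Int)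
    (hk : 1 ≤ k) (h : N ≤ pvP1 k) : pvTail N f OP k = OP := by
  have h12 := pvP2_eq k
  rw [pvTail]
  rw [if_neg (by omega : ¬ pvP2 k < N), if_pos (by omega : pvP1 k ≥ N)]

-- Main correspondence: A's loop entered at the even step 2(k-1) (value = pvSgn k,
-- nextOptions = [k, 2k+1], nextPosition = pvP2 k) computes the tail of B's iteration k.
lemma pvAB (N : Int) : ∀ (f : Nat) (k : Int) (OP : List Int), 1 ≤ k → N ≤ pvP1 k + f →
    pvLoopA N (2 * f + 2) OP (pvSgn k) (2 * (k - 1)) k (2 * k + 1) 0 (pvP2 k)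
      = pvTail N f OP k := by
  intro f
  induction f with
  | zero =>
    intro k OP hk hN
    have h12 := pvP2_eq k
    rw [show 2 * 0 + 2 = 1 + 1 from rfl, pvLoopA]
    rw [if_neg (by omega : ¬ pvP2 k < N)]
    rw [pvTail_vacuous N 0 k OP hk (by omega)]
  | succ f ih =>
    intro k OP hk hN
    have h12 := pvP2_eq k
    have h1s := pvP1_succ k
    have h2s := pvP2_eq (k + 1)
    by_cases hstop : N ≤ pvP1 k
    · rw [show 2 * (f + 1) + 2 = (2 * f + 3) + 1 from rfl, pvLoopA]
      rw [if_neg (by omega : ¬ pvP2 k < N)]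
      rw [pvTail_vacuous N (f + 1) k OP hk hstop]
    · push Not at hstop
      -- B side: one full loopB iteration at k+1, reassociated around its g1-write
      have hBtail : pvTail N (f + 1) OP k
          = pvTail N f ((if pvP1 (k + 1) < N
                then (if pvP2 k < N then OP.set (pvP2 k).toNat (pvSgn k) else OP).set
                      (pvP1 (k + 1)).toNat (pvSgn (k + 1))
                else (if pvP2 k < N then OP.set (pvP2 k).toNat (pvSgn k) else OP))) (k + 1) := by
        rw [pvTail, pvTail]
        rw [if_neg (by omega : ¬ pvP1 k ≥ N), pvLoopB]
        simp only [pvP1, pvP2, pvSgn]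
      rw [hBtail]
      -- A side: the even step (write at pvP2 k if in range; sign always flips; move to pvP1 (k+1))
      by_cases hP2 : pvP2 k < N
      · rw [show 2 * (f + 1) + 2 = (2 * f + 3) + 1 from rfl, pvLoopA]
        rw [if_pos hP2]
        simp only [beq_self_eq_true, if_pos, beq_iff_eq]
        rw [if_neg (by norm_num : ¬ (0:Int) = 1)]
        rw [show 2 * (k - 1) + 1 + 1 = 2 * k by ring, if_pos (pvMod4_even k)]
        rw [show 2 * (k - 1) + 1 = 2 * k - 1 by ring, pvMod2_odd k]
        rw [if_neg (by norm_num : ¬ (1:Int) = 0)]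
        -- the odd step at position pvP2 k + (2k+1) = pvP1 (k+1)
        rw [show (2 * f + 3) = (2 * f + 2) + 1 from rfl, pvLoopA]
        by_cases hP1s : pvP1 (k + 1) < N
        · rw [if_pos (by omega : pvP2 k + (2 * k + 1) < N)]
          simp only [beq_iff_eq, if_true]
          rw [if_neg (by norm_num : ¬ (1:Int) = 0)]
          rw [show 2 * k - 1 + 1 + 1 = 2 * k + 1 by ring, if_neg (by
            rw [PySem.Int.mod_eq_emod_of_pos (by norm_num : (0:Int) < 4)]
            intro h
            rcases Bool.or_eq_true_iff.mp h with h | h <;> rw [beq_iff_eq] at h <;> omega)]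
          rw [show 2 * k - 1 + 1 = 2 * k by ring, pvMod2_even k, if_pos (rfl : (0:Int) = 0)]
          rw [if_pos hP1s, if_pos hP2]
          rw [show pvP2 k + (2 * k + 1) = pvP1 (k + 1) by omega]
          rw [show pvP1 (k + 1) + (k + 1) = pvP2 (k + 1) by omega]
          rw [pvSgn_succ k]
          rw [show (2 : Int) * k = 2 * ((k + 1) - 1) by ring]
          rw [show (2 : Int) * (k + 1 - 1) + 1 + 2 = 2 * (k + 1) + 1 by ring]
          exact ih (k + 1) _ (by omega) (by omega)
        · rw [if_neg (by omega : ¬ pvP2 k + (2 * k + 1) < N)]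
          rw [if_neg hP1s, if_pos hP2]
          rw [pvTail_vacuous N f (k + 1) _ (by omega) (by omega)]
      · rw [show 2 * (f + 1) + 2 = (2 * f + 3) + 1 from rfl, pvLoopA]
        rw [if_neg hP2]
        rw [if_neg hP2, if_neg (by omega : ¬ pvP1 (k + 1) < N)]
        rw [pvTail_vacuous N f (k + 1) OP (by omega) (by omega)]

-- ===== VERDICT (by name: the statement is the Claim_ definition above) =====
theorem generatePMList_spec : Claim_equal_generatePMList := by
  intro N hdom hpre
  unfold Pre_generatePMList at hpre
  unfold Spec_generatePMList generatePMList generatePMList_alt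
  have hNt : (N.toNat : Int) = N := Int.toNat_of_nonneg (by omega)
  have hP11 : pvP1 1 = 0 := by decide
  have hA := pvAB N N.toNat 1 ((List.replicate N.toNat (0:Int)).set 0 1) (by norm_num)
    (by rw [hP11]; omega)
  have hs1 : pvSgn 1 = 1 := by decide
  have hp21 : pvP2 1 = 0 + 1 := by decide
  rw [hs1, hp21] at hA
  norm_num at hA ⊢
  rw [hA]
  -- B side: unfold the first loopB iteration; its g1-write rewrites index 0 with the same 1
  rw [pvLoopB]
  rw [show PySem.Int.floordiv (1 * (3 * 1 - 1)) 2 - 1 = pvP1 1 from rfl]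
  rw [show PySem.Int.floordiv (1 * (3 * 1 + 1)) 2 - 1 = pvP2 1 from rfl]
  rw [hP11]
  rw [if_pos (by omega : (0:Int) < N)]
  rw [show ((0:Int)).toNat = 0 from rfl, List.set_set]
  rw [show (if PySem.Int.mod 1 2 == 1 then (1:Int) else -1) = 1 from by decide]
  rw [if_neg (by omega : ¬ (0:Int) ≥ N)]
  -- now match pvTail with the loopB tail
  rw [pvTail, hp21, hs1, hP11]
  rw [if_neg (by omega : ¬ (0:Int) ≥ N)]
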